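-- pv_equiv track=rewrite | github.com/CodeWithRishav/GeeksForGeeks-Solutions | Difficulty: Medium/Palindrome Substring Queries/palindrome-substring-queries.py | buildRollingHash
-- ===== SOURCE A (Python) =====
-- def buildRollingHash(string, base1, base2, mod):
--     n = len(string)
--     preHash = [[0, 0] for _ in range(n + 1)]
--     power = [[1, 1] for _ in range(n + 1)]
--
--     for i in range(n):
--         preHash[i + 1][0] =\
--             (preHash[i][0] * base1 + ord(string[i])) % mod
--         preHash[i + 1][1] = \
--             (preHash[i][1] * base2 + ord(string[i])) % mod
--
--         power[i + 1][0] = \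
--             (power[i][0] * base1) % mod
--         power[i + 1][1] = \
--             (power[i][1] * base2) % mod
--
--     return preHash, power
-- ===== SOURCE B (Python) =====
-- def buildRollingHash(string, base1, base2, mod):
--     n = len(string)
--
--     def prefix(base):
--         out = [0]
--         h = 0
--         for ch in string:
--             h = (h * base + ord(ch)) % mod
--             out.append(h)
--         return out
--
--     h1 = prefix(base1)
--     h2 = prefix(base2)
--     preHash = [[a, b] for a, b in zip(h1, h2)]
--     power = [[1, 1]] + [[pow(base1, i, mod), pow(base2, i, mod)]
--                         for i in range(1, n + 1)]
--     return preHash, power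
-- ===== Notes on version B (the rewrite author's own statement) =====
-- stated objective: alternative
-- what changed: The powers array is computed by closed-form modular exponentiation pow(base, i, mod) per index instead of accumulating products in the loop, and the two hash prefix streams are built in separate passes and zipped, instead of one loop filling both 2-column arrays in place.
import Mathlib
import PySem

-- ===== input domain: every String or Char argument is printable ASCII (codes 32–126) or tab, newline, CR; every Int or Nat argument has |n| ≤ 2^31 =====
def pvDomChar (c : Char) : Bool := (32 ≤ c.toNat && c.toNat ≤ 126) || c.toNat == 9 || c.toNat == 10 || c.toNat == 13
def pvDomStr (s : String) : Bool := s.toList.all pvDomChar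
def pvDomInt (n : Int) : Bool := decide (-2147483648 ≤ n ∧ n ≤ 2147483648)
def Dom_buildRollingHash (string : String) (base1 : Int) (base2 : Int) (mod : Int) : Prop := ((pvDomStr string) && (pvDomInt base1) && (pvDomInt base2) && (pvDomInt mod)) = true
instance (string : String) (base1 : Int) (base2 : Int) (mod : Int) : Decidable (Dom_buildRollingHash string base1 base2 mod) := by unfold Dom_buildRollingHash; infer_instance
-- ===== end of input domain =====

-- B replaces the accumulated power products by closed-form modular exponentiation
-- (pow(base, i, mod)) and builds the two prefix-hash streams in separate passes; same cost class.

-- ===== PORT A =====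
-- A walks the string once, updating preHash[i+1] from preHash[i] and power[i+1] from power[i];
-- ported as a fold carrying the four current cells plus the two lists built so far.
def buildRollingHash (string : String) (base1 : Int) (base2 : Int) (mod : Int) : List (List Int) × List (List Int) :=
  (string.toList.foldl
    (fun (st : (Int × Int × Int × Int) × (List (List Int) × List (List Int))) (c : Char) =>
      let h1 := PySem.Int.mod (st.1.1 * base1 + (c.toNat : Int)) mod
      let h2 := PySem.Int.mod (st.1.2.1 * base2 + (c.toNat : Int)) mod
      let p1 := PySem.Int.mod (st.1.2.2.1 * base1) mod
      let p2 := PySem.Int.mod (st.1.2.2.2 * base2) mod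
      ((h1, h2, p1, p2), (st.2.1 ++ [[h1, h2]], st.2.2 ++ [[p1, p2]])))
    ((0, 0, 1, 1), ([[0, 0]], [[1, 1]])))
    |>.2

-- ===== PORT B =====
-- prefix(base) from Source B: the scan [0, h1, h2, …] of the hash recurrence.
def bPrefix (cs : List Char) (base : Int) (mod : Int) : List Int :=
  cs.scanl (fun h c => PySem.Int.mod (h * base + (c.toNat : Int)) mod) 0

def buildRollingHash_alt (string : String) (base1 : Int) (base2 : Int) (mod : Int) : List (List Int) × List (List Int) :=
  let cs := string.toList
  let h1 := bPrefix cs base1 mod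
  let h2 := bPrefix cs base2 mod
  let preHash := List.zipWith (fun a b => [a, b]) h1 h2
  let power := [1, 1] ::
    (PySem.List.pyRange 1 ((cs.length : Int) + 1) 1).map
      (fun i => [PySem.Int.powMod base1 i.toNat mod, PySem.Int.powMod base2 i.toNat mod])
  (preHash, power)

-- ===== PRECONDITION & SPEC =====
-- Pre_ excludes only mod = 0 with a nonempty string: there Python A raises ZeroDivisionError.
def Pre_buildRollingHash (string : String) (base1 : Int) (base2 : Int) (mod : Int) : Prop :=
  string = "" ∨ mod ≠ 0
instance (string : String) (base1 : Int) (base2 : Int) (mod : Int) : Decidable (Pre_buildRollingHash string base1 base2 mod) := by unfold Pre_buildRollingHash; infer_instance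

def pvWitness_buildRollingHash : String × Int × Int × Int := ("ab", 31, 37, 1000000007)

def Spec_buildRollingHash (string : String) (base1 : Int) (base2 : Int) (mod : Int) (out : List (List Int) × List (List Int)) : Prop := out = buildRollingHash_alt string base1 base2 mod
instance (string : String) (base1 : Int) (base2 : Int) (mod : Int) (out : List (List Int) × List (List Int)) : Decidable (Spec_buildRollingHash string base1 base2 mod out) := by unfold Spec_buildRollingHash; infer_instance

-- ===== CLAIM (what is proved, stated in full; the proofs are below) =====
def Claim_equal_buildRollingHash : Prop := ∀ (string : String) (base1 : Int) (base2 : Int) (mod : Int), Dom_buildRollingHash string base1 base2 mod → Pre_buildRollingHash string base1 base2 mod → Spec_buildRollingHash string base1 base2 mod (buildRollingHash string base1 base2 mod)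

-- ===== LEMMAS AND PROOFS =====

-- reducing a factor mod m first does not change a product mod m (any m; Python's floor mod)
theorem pv_fmod_mul_left (x y m : Int) : PySem.Int.mod (PySem.Int.mod x m * y) m = PySem.Int.mod (x * y) m := by
  show ((x.fmod m) * y).fmod m = (x * y).fmod m
  rw [show x.fmod m * y = x * y + -(x.fdiv m * y) * m by rw [Int.fmod_def]; ring,
      Int.add_mul_fmod_self_right]

-- the tail of A's power scan is the closed-form list of p·baseᵏ⁺¹ mod m
theorem pv_power_scan (base m : Int) :
    ∀ (cs : List Char) (p : Int),
      (cs.scanl (fun q (_ : Char) => PySem.Int.mod (q * base) m) p).tail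
        = (List.range cs.length).map (fun k => PySem.Int.mod (p * base ^ (k + 1)) m) := by
  intro cs
  induction cs with
  | nil => intro p; simp [List.scanl]
  | cons c cs ih =>
    intro p
    rw [List.scanl_cons, List.tail_cons, List.length_cons, List.range_succ_eq_map]
    have hhead : cs.scanl (fun q (_ : Char) => PySem.Int.mod (q * base) m) (PySem.Int.mod (p * base) m)
        = PySem.Int.mod (p * base) m ::
          (cs.scanl (fun q (_ : Char) => PySem.Int.mod (q * base) m) (PySem.Int.mod (p * base) m)).tail := by
      cases cs <;> simp [List.scanl]
    rw [hhead, ih (PySem.Int.mod (p * base) m)]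
    simp only [List.map_cons, List.map_map]
    refine congrArg₂ _ (by norm_num) ?_
    refine List.map_congr_left (fun k _ => ?_)
    simp only [Function.comp_apply]
    rw [pv_fmod_mul_left]
    congr 1
    rw [Nat.succ_eq_add_one]
    ring

-- A's fold, from an arbitrary state, appends the scans of the two hash and two power recurrences
theorem pv_foldA (base1 base2 m : Int) :
    ∀ (cs : List Char) (h1 h2 p1 p2 : Int) (AH AP : List (List Int)),
      (cs.foldl
        (fun (st : (Int × Int × Int × Int) × (List (List Int) × List (List Int))) (c : Char) =>
          let v1 := PySem.Int.mod (st.1.1 * base1 + (c.toNat : Int)) m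
          let v2 := PySem.Int.mod (st.1.2.1 * base2 + (c.toNat : Int)) m
          let q1 := PySem.Int.mod (st.1.2.2.1 * base1) m
          let q2 := PySem.Int.mod (st.1.2.2.2 * base2) m
          ((v1, v2, q1, q2), (st.2.1 ++ [[v1, v2]], st.2.2 ++ [[q1, q2]])))
        ((h1, h2, p1, p2), (AH, AP))).2
      = (AH ++ List.zipWith (fun a b => [a, b])
            (cs.scanl (fun h c => PySem.Int.mod (h * base1 + (c.toNat : Int)) m) h1).tail
            (cs.scanl (fun h c => PySem.Int.mod (h * base2 + (c.toNat : Int)) m) h2).tail,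
         AP ++ List.zipWith (fun a b => [a, b])
            (cs.scanl (fun q (_ : Char) => PySem.Int.mod (q * base1) m) p1).tail
            (cs.scanl (fun q (_ : Char) => PySem.Int.mod (q * base2) m) p2).tail) := by
  intro cs
  induction cs with
  | nil => intro h1 h2 p1 p2 AH AP; simp [List.scanl]
  | cons c cs ih =>
    intro h1 h2 p1 p2 AH AP
    rw [List.foldl_cons]
    rw [ih]
    simp only [List.scanl_cons, List.tail_cons]
    have htl : ∀ (f : Int → Char → Int) (x : Int),
        cs.scanl f x = x :: (cs.scanl f x).tail := by
      intro f x; cases cs <;> simp [List.scanl]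
    rw [htl _ (PySem.Int.mod (h1 * base1 + (c.toNat : Int)) m),
        htl _ (PySem.Int.mod (h2 * base2 + (c.toNat : Int)) m),
        htl _ (PySem.Int.mod (p1 * base1) m),
        htl _ (PySem.Int.mod (p2 * base2) m)]
    simp [List.append_assoc]

-- zipping two maps over the same list is one map
theorem pv_zip_map {α : Type} (f g : α → Int) (l : List α) :
    List.zipWith (fun a b => [a, b]) (l.map f) (l.map g) = l.map (fun x => [f x, g x]) := by
  induction l with
  | nil => rfl
  | cons x l ih => simp [ih]

theorem buildRollingHash_spec : Claim_equal_buildRollingHash := by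
  intro s base1 base2 m _ _
  unfold Spec_buildRollingHash buildRollingHash buildRollingHash_alt bPrefix
  rw [pv_foldA base1 base2 m s.toList 0 0 1 1 [[0, 0]] [[1, 1]]]
  refine Prod.ext ?_ ?_
  · -- preHash: B's zip of two scans starts with [0,0] then the tails
    show [[0, 0]] ++ _ = List.zipWith _ _ _
    have h1 : ∀ (f : Int → Char → Int),
        s.toList.scanl f 0 = 0 :: (s.toList.scanl f 0).tail := by
      intro f; cases s.toList <;> simp [List.scanl]
    rw [h1 (fun h c => PySem.Int.mod (h * base1 + (c.toNat : Int)) m),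
        h1 (fun h c => PySem.Int.mod (h * base2 + (c.toNat : Int)) m)]
    simp
  · -- power: A's accumulated products equal B's closed-form powers
    show [[1, 1]] ++ _ = [1, 1] :: _
    rw [pv_power_scan base1 m s.toList 1, pv_power_scan base2 m s.toList 1]
    rw [pv_zip_map]
    rw [PySem.List.pyRange_one]
    have hn : (((s.toList.length : Int) + 1) - 1).toNat = s.toList.length := by omega
    rw [hn, List.map_map]
    refine congrArg₂ _ rfl ?_
    refine List.map_congr_left (fun k _ => ?_)
    simp only [Function.comp_apply]
    have ht : ((1 : Int) + (k : Int)).toNat = k + 1 := by omega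
    simp only [PySem.Int.powMod, ht, one_mul]
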